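-- pv_equiv track=rewrite | github.com/opelr/groupgen | app/backend.py | _get_nested_position
-- ===== SOURCE A (Python) =====
-- def _get_nested_position(var: str, chart: list):
--     """Finds position of a variable inside a nested list
--
--     Args:
--         var (str): Variable we're searching for
--         chart (list): Nested list
--
--     Returns:
--         int: Index of nested list that contains `var`. Returns None if not found.
--     """
--     idx = [chart.index(i) for i in chart if var in i]
--     if len(idx) == 1:
--         return idx[0]
--     if len(idx) == 0:
--         return None
--     else:
--         raise KeyError("Value occurrs more than once")
-- ===== SOURCE B (Python) =====
-- def _get_nested_position(var: str, chart: list):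
--     """Finds position of a variable inside a nested list (single-pass loop)."""
--     found = None
--     for i, sub in enumerate(chart):
--         if var in sub:
--             if found is not None:
--                 raise KeyError("Value occurrs more than once")
--             found = i
--     return found
-- ===== Notes on version B (the rewrite author's own statement) =====
-- stated objective: simpler
-- what changed: Replaced the comprehension that calls chart.index on every matching sublist (an inner O(n) scan per match) by a single explicit enumerate loop maintaining a found index and raising on the second match.
import Mathlib
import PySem

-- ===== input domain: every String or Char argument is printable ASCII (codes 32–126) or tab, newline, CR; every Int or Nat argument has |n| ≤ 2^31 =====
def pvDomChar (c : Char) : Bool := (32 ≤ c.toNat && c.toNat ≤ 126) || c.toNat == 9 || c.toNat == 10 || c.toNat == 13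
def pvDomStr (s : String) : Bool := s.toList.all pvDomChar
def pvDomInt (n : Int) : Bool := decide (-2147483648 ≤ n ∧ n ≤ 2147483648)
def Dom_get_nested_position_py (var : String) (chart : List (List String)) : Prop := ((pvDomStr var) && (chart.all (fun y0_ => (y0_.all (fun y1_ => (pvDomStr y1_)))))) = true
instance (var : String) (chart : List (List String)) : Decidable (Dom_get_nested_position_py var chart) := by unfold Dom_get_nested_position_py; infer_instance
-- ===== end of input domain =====

-- B replaces A's comprehension of chart.index calls by one explicit enumerate loop
-- with a maintained found-index and early raise on a second match (objective: simpler).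


-- ===== PORT A =====
-- idx = [chart.index(i) for i in chart if var in i]; len==1 -> idx[0]; len==0 -> None; else raise KeyError.
-- The raise branch is excluded by Pre_; the port returns none there (unchecked).
-- chart.index(i) always succeeds (i ∈ chart), so the ValueError case of index? cannot occur; .getD 0 is exact.
def get_nested_position_py (var : String) (chart : List (List String)) : Option Int :=
  let idx : List Int :=
    (chart.filter (fun i => decide (var ∈ i))).map
      (fun i => Int.ofNat ((PySem.List.index? chart i).getD 0))
  if idx.length = 1 then some (idx.headD 0)
  else if idx.length = 0 then none
  else none  -- raise KeyError("Value occurrs more than once"): outside Pre_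

-- ===== PORT B =====
-- explicit loop: found starts None; first match stores i; a second match raises (outside Pre_, port returns none).
def get_nested_position_alt_go (var : String) : List (List String) → Int → Option Int → Option Int
  | [], _, found => found
  | sub :: rest, i, found =>
    if var ∈ sub then
      match found with
      | some _ => none  -- raise KeyError("Value occurrs more than once"): outside Pre_
      | none => get_nested_position_alt_go var rest (i + 1) (some i)
    else get_nested_position_alt_go var rest (i + 1) found

def get_nested_position_py_alt (var : String) (chart : List (List String)) : Option Int :=
  get_nested_position_alt_go var chart 0 none

-- ===== PRECONDITION & SPEC =====
-- Pre_ excludes exactly the inputs on which A (and B alike) raises KeyError: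
-- more than one sublist of chart contains var.
def Pre_get_nested_position_py (var : String) (chart : List (List String)) : Prop :=
  (chart.filter (fun i => decide (var ∈ i))).length ≤ 1
instance (var : String) (chart : List (List String)) : Decidable (Pre_get_nested_position_py var chart) := by unfold Pre_get_nested_position_py; infer_instance

def pvWitness_get_nested_position_py : String × List (List String) := ("x", [["a"], ["x", "b"]])

def Spec_get_nested_position_py (var : String) (chart : List (List String)) (out : Option Int) : Prop := out = get_nested_position_py_alt var chart
instance (var : String) (chart : List (List String)) (out : Option Int) : Decidable (Spec_get_nested_position_py var chart out) := by unfold Spec_get_nested_position_py; infer_instance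

-- ===== CLAIM (what is proved, stated in full; the proofs are below) =====
def Claim_equal_get_nested_position_py : Prop := ∀ (var : String) (chart : List (List String)), Dom_get_nested_position_py var chart → Pre_get_nested_position_py var chart → Spec_get_nested_position_py var chart (get_nested_position_py var chart)

-- ===== LEMMAS AND PROOFS =====

-- proof-only reference function: index of the first sublist containing var
def pvFM (var : String) : List (List String) → Option Int
  | [] => none
  | s :: t => if var ∈ s then some 0 else (pvFM var t).map (· + 1)

theorem pvFM_eq_none_iff (var : String) (chart : List (List String)) :
    pvFM var chart = none ↔ chart.filter (fun i => decide (var ∈ i)) = [] := by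
  induction chart with
  | nil => simp [pvFM]
  | cons h t ih =>
    by_cases hm : var ∈ h <;> simp [pvFM, hm, ih]

theorem pvIndex_eq_pvFM (var : String) (chart : List (List String)) (s : List String)
    (h : chart.filter (fun i => decide (var ∈ i)) = [s]) :
    (PySem.List.index? chart s).map Int.ofNat = pvFM var chart := by
  induction chart with
  | nil => simp [List.filter_nil] at h
  | cons a t ih =>
    by_cases hm : var ∈ a
    · rw [List.filter_cons_of_pos (by simpa using hm)] at h
      obtain ⟨rfl, ht⟩ : a = s ∧ t.filter (fun i => decide (var ∈ i)) = [] := by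
        constructor <;> simp_all
      rw [PySem.List.index?_cons_self]
      simp [pvFM, hm]
    · rw [List.filter_cons_of_neg (by simpa using hm)] at h
      have hne : a ≠ s := by
        intro hEq; subst hEq
        have : a ∈ t.filter (fun i => decide (var ∈ i)) := by rw [h]; simp
        exact hm (by simpa using (List.mem_filter.mp this).2)
      rw [PySem.List.index?_cons_of_ne t hne]
      simp only [pvFM, if_neg hm, ← ih h]
      cases PySem.List.index? t s <;> simp

theorem go_of_no_match (var : String) (t : List (List String)) (i : Int) (found : Option Int)
    (h : t.filter (fun s => decide (var ∈ s)) = []) :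
    get_nested_position_alt_go var t i found = found := by
  induction t generalizing i with
  | nil => rfl
  | cons a r ih =>
    by_cases hm : var ∈ a
    · exfalso; rw [List.filter_cons_of_pos (by simpa using hm)] at h; simp at h
    · rw [List.filter_cons_of_neg (by simpa using hm)] at h
      simpa [get_nested_position_alt_go, hm] using ih (i + 1) h

theorem go_eq_pvFM (var : String) (chart : List (List String)) (i : Int)
    (h : (chart.filter (fun s => decide (var ∈ s))).length ≤ 1) :
    get_nested_position_alt_go var chart i none = (pvFM var chart).map (i + ·) := by
  induction chart generalizing i with
  | nil => rfl
  | cons a t ih =>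
    by_cases hm : var ∈ a
    · rw [List.filter_cons_of_pos (by simpa using hm)] at h
      have ht : t.filter (fun s => decide (var ∈ s)) = [] := by
        cases hh : t.filter (fun s => decide (var ∈ s)) with
        | nil => rfl
        | cons x xs => rw [hh] at h; simp at h
      simp [get_nested_position_alt_go, hm, pvFM, go_of_no_match var t (i + 1) (some i) ht]
    · rw [List.filter_cons_of_neg (by simpa using hm)] at h
      rw [show get_nested_position_alt_go var (a :: t) i none =
            get_nested_position_alt_go var t (i + 1) none by
            simp [get_nested_position_alt_go, hm]]
      rw [ih (i + 1) h]
      simp only [pvFM, if_neg hm]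
      cases pvFM var t <;> (simp; try omega)

theorem A_eq_pvFM (var : String) (chart : List (List String))
    (h : (chart.filter (fun i => decide (var ∈ i))).length ≤ 1) :
    get_nested_position_py var chart = pvFM var chart := by
  unfold get_nested_position_py
  cases hf : chart.filter (fun i => decide (var ∈ i)) with
  | nil => simp [(pvFM_eq_none_iff var chart).mpr hf]
  | cons s rest =>
    have hrest : rest = [] := by
      rw [hf] at h; cases rest with
      | nil => rfl
      | cons _ _ => simp at h
    subst hrest
    have hidx := pvIndex_eq_pvFM var chart s hf
    have hs : s ∈ chart := (List.mem_filter.mp (by rw [hf]; simp)).1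
    have hsome : (PySem.List.index? chart s).isSome := by
      rw [PySem.List.index?_isSome_iff]; exact hs
    obtain ⟨k, hk⟩ := Option.isSome_iff_exists.mp hsome
    rw [hk] at hidx
    simp only [List.map_cons, List.map_nil, List.length_cons, List.length_nil, List.headD]
    rw [← hidx]
    simp [PySem.List.index?_eq_idxOf?] at hk
    simp [hk]

theorem B_eq_pvFM (var : String) (chart : List (List String))
    (h : (chart.filter (fun i => decide (var ∈ i))).length ≤ 1) :
    get_nested_position_py_alt var chart = pvFM var chart := by
  unfold get_nested_position_py_alt
  rw [go_eq_pvFM var chart 0 h]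
  cases pvFM var chart <;> simp

-- ===== VERDICT (by name: the statement is the Claim_ definition above) =====
theorem get_nested_position_py_spec : Claim_equal_get_nested_position_py := by
  intro var chart _ hpre
  unfold Spec_get_nested_position_py
  rw [A_eq_pvFM var chart hpre, B_eq_pvFM var chart hpre]
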